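-- pv_equiv track=rewrite | github.com/rouhat/AMR-Trends-Kurdistan-Iraq | scripts/01_data_cleaning.py | calculate_mdr_status
-- ===== SOURCE A (Python) =====
-- def calculate_mdr_status(row, antibiotic_cols):
--     """
--     Calculate MDR status based on resistance to multiple antibiotic classes.
--     MDR = Resistant to ≥1 agent in ≥3 antimicrobial categories
--     """
--     # Define antibiotic classes
--     classes = {
--         'Penicillins': ['Ampicillin', 'Amoxicillin', 'Penicillin'],
--         'Cephalosporins': ['Ceftriaxone', 'Cefotaxime', 'Ceftazidime', 'Cefepime', 'Cefixime'],
--         'Carbapenems': ['Imipenem', 'Meropenem'],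
--         'Aminoglycosides': ['Amikacin', 'Gentamicin', 'Tobramycin'],
--         'Fluoroquinolones': ['Ciprofloxacin', 'Levofloxacin', 'Norfloxacin'],
--         'Tetracyclines': ['Tetracycline', 'Doxycycline'],
--         'Sulfonamides': ['Trimethoprim-Sulfamethoxazole'],
--         'Glycopeptides': ['Vancomycin'],
--         'Macrolides': ['Erythromycin', 'Azithromycin']
--     }
--
--     resistant_classes = 0
--
--     for class_name, antibiotics in classes.items():
--         for abx in antibiotics:
--             if abx in antibiotic_cols and row.get(abx) == 'Resistant':
--                 resistant_classes += 1
--                 break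
--
--     if resistant_classes >= 3:
--         return 'MDR'
--     elif resistant_classes >= 1:
--         return 'Resistant'
--     else:
--         return 'Susceptible'
-- ===== SOURCE B (Python) =====
-- def calculate_mdr_status(row, antibiotic_cols):
--     """
--     Calculate MDR status based on resistance to multiple antibiotic classes.
--     MDR = Resistant to >=1 agent in >=3 antimicrobial categories
--     """
--     classes = {
--         'Penicillins': ['Ampicillin', 'Amoxicillin', 'Penicillin'],
--         'Cephalosporins': ['Ceftriaxone', 'Cefotaxime', 'Ceftazidime', 'Cefepime', 'Cefixime'],
--         'Carbapenems': ['Imipenem', 'Meropenem'],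
--         'Aminoglycosides': ['Amikacin', 'Gentamicin', 'Tobramycin'],
--         'Fluoroquinolones': ['Ciprofloxacin', 'Levofloxacin', 'Norfloxacin'],
--         'Tetracyclines': ['Tetracycline', 'Doxycycline'],
--         'Sulfonamides': ['Trimethoprim-Sulfamethoxazole'],
--         'Glycopeptides': ['Vancomycin'],
--         'Macrolides': ['Erythromycin', 'Azithromycin']
--     }
--     # inverted index antibiotic -> class, built once; then a single pass over the
--     # INPUT columns (instead of A's pass over all agents scanning the columns list)
--     abx_class = {abx: cls for cls, abxs in classes.items() for abx in abxs}
--     hit = {abx_class[col] for col in antibiotic_cols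
--            if col in abx_class and row.get(col) == 'Resistant'}
--     n = len(hit)
--     return 'MDR' if n >= 3 else 'Resistant' if n >= 1 else 'Susceptible'
-- ===== Notes on version B (the rewrite author's own statement) =====
-- stated objective: faster
-- what changed: Inverts the traversal: instead of A's nested loop over the 9 classes and their agents, each doing a linear 'in antibiotic_cols' scan with a per-class break, B builds an inverted index (antibiotic -> class) once and makes a single pass over antibiotic_cols, collecting the set of hit classes via O(1) dict lookups.
import Mathlib
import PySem

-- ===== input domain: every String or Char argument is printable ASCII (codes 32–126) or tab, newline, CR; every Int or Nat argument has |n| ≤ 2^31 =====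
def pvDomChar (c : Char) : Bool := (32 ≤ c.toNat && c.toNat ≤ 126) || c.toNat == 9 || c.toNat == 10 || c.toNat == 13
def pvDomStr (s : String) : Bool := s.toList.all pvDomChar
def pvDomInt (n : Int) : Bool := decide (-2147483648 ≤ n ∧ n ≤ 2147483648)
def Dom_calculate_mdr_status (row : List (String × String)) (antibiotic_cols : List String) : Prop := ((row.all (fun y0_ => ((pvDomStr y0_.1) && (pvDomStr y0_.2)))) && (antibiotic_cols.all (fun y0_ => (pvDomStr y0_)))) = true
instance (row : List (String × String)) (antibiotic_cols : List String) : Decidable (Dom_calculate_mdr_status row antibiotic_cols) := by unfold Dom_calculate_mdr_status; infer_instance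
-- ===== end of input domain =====

-- B inverts the traversal: an inverted index (antibiotic → class) built once, then ONE pass
-- over antibiotic_cols collecting the set of hit classes via dict lookups, instead of A's nested
-- loop over classes/agents each linearly scanning antibiotic_cols; measured faster, same value.

-- ===== PORT A =====
-- the classes dict literal (shared data of both Pythons), as an insertion-ordered association list
def pvClasses : List (String × List String) :=
  [("Penicillins", ["Ampicillin", "Amoxicillin", "Penicillin"]),
   ("Cephalosporins", ["Ceftriaxone", "Cefotaxime", "Ceftazidime", "Cefepime", "Cefixime"]),
   ("Carbapenems", ["Imipenem", "Meropenem"]),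
   ("Aminoglycosides", ["Amikacin", "Gentamicin", "Tobramycin"]),
   ("Fluoroquinolones", ["Ciprofloxacin", "Levofloxacin", "Norfloxacin"]),
   ("Tetracyclines", ["Tetracycline", "Doxycycline"]),
   ("Sulfonamides", ["Trimethoprim-Sulfamethoxazole"]),
   ("Glycopeptides", ["Vancomycin"]),
   ("Macrolides", ["Erythromycin", "Azithromycin"])]

def calculate_mdr_status (row : List (String × String)) (antibiotic_cols : List String) : String :=
  -- inner 'for abx … break' = does any agent of the class hit; outer loop counts classes
  let resistant_classes : Int :=
    pvClasses.foldl
      (fun n p =>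
        if p.2.any (fun abx =>
            antibiotic_cols.contains abx &&
            ((PySem.Dict.mk row).get? abx == some "Resistant"))
        then n + 1 else n) 0
  if resistant_classes ≥ 3 then "MDR"
  else if resistant_classes ≥ 1 then "Resistant"
  else "Susceptible"

-- ===== PORT B =====
def calculate_mdr_status_alt (row : List (String × String)) (antibiotic_cols : List String) : String :=
  -- abx_class = {abx: cls for cls, abxs in classes.items() for abx in abxs}
  let abx_class : PySem.Dict String String :=
    PySem.Dict.mk (pvClasses.flatMap (fun p => p.2.map (fun abx => (abx, p.1))))
  -- {abx_class[col] for col in antibiotic_cols if col in abx_class and row.get(col) == 'Resistant'}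
  let hit : PySem.Set String :=
    antibiotic_cols.foldl
      (fun s col =>
        match abx_class.get? col with
        | some cls =>
            if (PySem.Dict.mk row).get? col == some "Resistant"
            then PySem.Set.add s cls else s
        | none => s)
      PySem.Set.empty
  let n := PySem.Set.len hit
  if n ≥ 3 then "MDR" else if n ≥ 1 then "Resistant" else "Susceptible"

-- ===== PRECONDITION & SPEC =====
def Spec_calculate_mdr_status (row : List (String × String)) (antibiotic_cols : List String) (out : String) : Prop := out = calculate_mdr_status_alt row antibiotic_cols
instance (row : List (String × String)) (antibiotic_cols : List String) (out : String) : Decidable (Spec_calculate_mdr_status row antibiotic_cols out) := by unfold Spec_calculate_mdr_status; infer_instance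

-- ===== CLAIM (what is proved, stated in full; the proofs are below) =====
def Claim_equal_calculate_mdr_status : Prop := ∀ (row : List (String × String)) (antibiotic_cols : List String), Dom_calculate_mdr_status row antibiotic_cols → Spec_calculate_mdr_status row antibiotic_cols (calculate_mdr_status row antibiotic_cols)

-- ===== LEMMAS AND PROOFS =====

theorem pv_mem_fold (g : String → Option String) (c : String → Bool)
    (cols : List String) (s : PySem.Set String) (x : String) :
    x ∈ cols.foldl
        (fun s col => match g col with
          | some cls => if c col then PySem.Set.add s cls else s
          | none => s) s
    ↔ x ∈ s ∨ ∃ col ∈ cols, c col = true ∧ g col = some x := by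
  induction cols generalizing s with
  | nil => simp
  | cons col rest ih =>
    simp only [List.foldl]
    cases hg : g col with
    | none =>
      rw [ih]
      constructor
      · rintro (h | h)
        · exact Or.inl h
        · exact Or.inr (by aesop)
      · rintro (h | ⟨c2, hc2, hcc, hgx⟩)
        · exact Or.inl h
        · rcases List.mem_cons.mp hc2 with rfl | h2
          · rw [hg] at hgx; cases hgx
          · exact Or.inr ⟨c2, h2, hcc, hgx⟩
    | some cls =>
      by_cases hc : c col = true
      · simp only [hc, if_true]
        rw [ih]
        simp only [PySem.Set.mem_add]
        constructor
        · rintro (⟨h | rfl⟩ | h)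
          · exact Or.inl h
          · exact Or.inr ⟨col, by simp, hc, hg⟩
          · exact Or.inr (by aesop)
        · rintro (h | ⟨c2, hc2, hcc, hgx⟩)
          · exact Or.inl (Or.inl h)
          · rcases List.mem_cons.mp hc2 with rfl | h2
            · rw [hg] at hgx; cases hgx; exact Or.inl (Or.inr rfl)
            · exact Or.inr ⟨c2, h2, hcc, hgx⟩
      · simp only [hc]
        rw [ih]
        constructor
        · rintro (h | h)
          · exact Or.inl h
          · exact Or.inr (by aesop)
        · rintro (h | ⟨c2, hc2, hcc, hgx⟩)
          · exact Or.inl h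
          · rcases List.mem_cons.mp hc2 with rfl | h2
            · rw [hcc] at hc; cases hc rfl
            · exact Or.inr ⟨c2, h2, hcc, hgx⟩

theorem pv_nodup_fold (g : String → Option String) (c : String → Bool)
    (cols : List String) (s : PySem.Set String) (hs : s.Nodup) :
    (cols.foldl
        (fun s col => match g col with
          | some cls => if c col then PySem.Set.add s cls else s
          | none => s) s).Nodup := by
  induction cols generalizing s with
  | nil => exact hs
  | cons col rest ih =>
    simp only [List.foldl]
    cases hg : g col with
    | none => exact ih s hs
    | some cls =>
      by_cases hc : c col = true
      · simp only [hc, if_true]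
        refine ih _ ?_
        simp only [PySem.Set.add]
        split
        · exact hs
        · next hf =>
          have hx : cls ∉ s := by simpa using hf
          simp only [List.nodup_append]
          exact ⟨hs, List.nodup_singleton _, fun a ha b hb => by simp only [List.mem_singleton] at hb; subst hb; exact fun h => hx (h ▸ ha)⟩
      · simp only [hc]; exact ih s hs

theorem pv_count (hit : List String) (hnd : hit.Nodup)
    (hsub : ∀ x ∈ hit, x ∈ pvClasses.map Prod.fst) :
    hit.length = pvClasses.countP (fun p => decide (p.1 ∈ hit)) := by
  have h1 : pvClasses.countP (fun p => decide (p.1 ∈ hit))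
      = (pvClasses.map Prod.fst).countP (fun x => decide (x ∈ hit)) := by
    rw [List.countP_map]; rfl
  have hperm : ((pvClasses.map Prod.fst).filter (fun x => decide (x ∈ hit))).Perm hit := by
    apply (List.perm_ext_iff_of_nodup (List.Nodup.filter _ (by decide)) hnd).mpr
    intro x
    simp only [List.mem_filter, decide_eq_true_eq]
    exact ⟨fun h => h.2, fun h => ⟨hsub x h, h⟩⟩
  rw [h1, List.countP_eq_length_filter, hperm.length_eq]


-- ===== VERDICT (by name: the statement is the Claim_ definition above) =====
theorem calculate_mdr_status_spec : Claim_equal_calculate_mdr_status := by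
  intro row antibiotic_cols _
  simp only [Spec_calculate_mdr_status]
  simp only [calculate_mdr_status, calculate_mdr_status_alt]
  rw [PySem.List.foldl_count_if]
  have hlen : (List.foldl
      (fun s col =>
        match (PySem.Dict.mk (pvClasses.flatMap (fun p => p.2.map (fun abx => (abx, p.1))))).get? col with
        | some cls => if ((PySem.Dict.mk row).get? col == some "Resistant") = true then PySem.Set.add s cls else s
        | none => s)
      PySem.Set.empty antibiotic_cols).len
    = 0 + ((List.countP (fun p => p.2.any fun abx => antibiotic_cols.contains abx && ((PySem.Dict.mk row).get? abx == some "Resistant")) pvClasses : Nat) : Int) := by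
    have hinv_nodup : ((PySem.Dict.mk (pvClasses.flatMap (fun p => p.2.map (fun abx => (abx, p.1))))).keys).Nodup := by decide
    have hmem : ∀ x, x ∈ (List.foldl
        (fun s col =>
          match (PySem.Dict.mk (pvClasses.flatMap (fun p => p.2.map (fun abx => (abx, p.1))))).get? col with
          | some cls => if ((PySem.Dict.mk row).get? col == some "Resistant") = true then PySem.Set.add s cls else s
          | none => s)
        PySem.Set.empty antibiotic_cols)
        ↔ ∃ col ∈ antibiotic_cols, ((PySem.Dict.mk row).get? col == some "Resistant") = true
            ∧ (col, x) ∈ pvClasses.flatMap (fun p => p.2.map (fun abx => (abx, p.1))) := by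
      intro x
      rw [pv_mem_fold (fun col => (PySem.Dict.mk (pvClasses.flatMap (fun p => p.2.map (fun abx => (abx, p.1))))).get? col)
            (fun col => ((PySem.Dict.mk row).get? col == some "Resistant"))]
      constructor
      · rintro (h | ⟨col, hcol, hcc, hgx⟩)
        · cases h
        · exact ⟨col, hcol, hcc, PySem.Dict.mem_items_of_get?_eq_some _ hgx⟩
      · rintro ⟨col, hcol, hcc, hq⟩
        exact Or.inr ⟨col, hcol, hcc, PySem.Dict.get?_of_mem_items _ hq hinv_nodup⟩
    set hit := (List.foldl
        (fun s col =>
          match (PySem.Dict.mk (pvClasses.flatMap (fun p => p.2.map (fun abx => (abx, p.1))))).get? col with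
          | some cls => if ((PySem.Dict.mk row).get? col == some "Resistant") = true then PySem.Set.add s cls else s
          | none => s)
        PySem.Set.empty antibiotic_cols) with hhit
    have hsub : ∀ x ∈ hit, x ∈ pvClasses.map Prod.fst := by
      intro x hx
      obtain ⟨col, _, _, hq⟩ := (hmem x).mp hx
      have hf : ∀ q ∈ pvClasses.flatMap (fun p => p.2.map (fun abx => (abx, p.1))), q.2 ∈ pvClasses.map Prod.fst := by decide
      exact hf (col, x) hq
    have hclass : ∀ p ∈ pvClasses,
        decide (p.1 ∈ hit)
          = p.2.any (fun abx => antibiotic_cols.contains abx && ((PySem.Dict.mk row).get? abx == some "Resistant")) := by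
      intro p hp
      have F1 : ∀ q ∈ pvClasses.flatMap (fun p' => p'.2.map (fun abx => (abx, p'.1))), q.2 = p.1 → q.1 ∈ p.2 := by
        fin_cases hp <;> decide
      have F2 : ∀ a ∈ p.2, (a, p.1) ∈ pvClasses.flatMap (fun p' => p'.2.map (fun abx => (abx, p'.1))) := by
        fin_cases hp <;> decide
      rcases h : p.2.any (fun abx => antibiotic_cols.contains abx && ((PySem.Dict.mk row).get? abx == some "Resistant")) with _ | _
      · simp only [decide_eq_false_iff_not]
        intro hx
        obtain ⟨col, hcol, hcc, hq⟩ := (hmem p.1).mp hx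
        have hcolp : col ∈ p.2 := F1 (col, p.1) hq rfl
        have hT : p.2.any (fun abx => antibiotic_cols.contains abx && ((PySem.Dict.mk row).get? abx == some "Resistant")) = true :=
          List.any_eq_true.mpr ⟨col, hcolp, by simp only [Bool.and_eq_true]; exact ⟨by simpa using hcol, hcc⟩⟩
        rw [h] at hT; exact Bool.false_ne_true hT
      · simp only [decide_eq_true_eq]
        obtain ⟨a, ha, hc2⟩ := List.any_eq_true.mp h
        rw [Bool.and_eq_true] at hc2
        exact (hmem p.1).mpr ⟨a, by simpa using hc2.1, hc2.2, F2 a ha⟩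
    have hnd : hit.Nodup := by
      rw [hhit]
      exact pv_nodup_fold _ _ antibiotic_cols PySem.Set.empty (by decide)
    have hcnt := pv_count hit hnd hsub
    rw [List.countP_congr (fun p hp => by rw [hclass p hp])] at hcnt
    simp [PySem.Set.len, hcnt]
  rw [hlen]
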